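-- pv_equiv track=rewrite | github.com/timurgs/django-databases-1-hw | models_list_displaying/books/views.py | next_previous_pages
-- ===== SOURCE A (Python) =====
-- def next_previous_pages(res, dp):
--     next_date = None
--     previous_date = None
--     date_list = [r[3] for r in res]
--     sorted_result = list(sorted(set(date_list)))
--     for ind, r in enumerate(sorted_result):
--         if r == dp:
--             if sorted_result[ind] != sorted_result[-1]:
--                 next_date = sorted_result[ind + 1]
--             if sorted_result[ind] != sorted_result[0]:
--                 previous_date = sorted_result[ind - 1]
--             return next_date, previous_date
-- ===== SOURCE B (Python) =====
-- def next_previous_pages(res, dp):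
--     dates = set(r[3] for r in res)
--     if dp not in dates:
--         return None
--     greater = [d for d in dates if d > dp]
--     lesser = [d for d in dates if d < dp]
--     next_date = min(greater) if greater else None
--     previous_date = max(lesser) if lesser else None
--     return next_date, previous_date
-- ===== Notes on version B (the rewrite author's own statement) =====
-- stated objective: alternative
-- what changed: Replaces the full sort of the date set plus an enumerate scan with neighbour indexing by a membership test and a partition of the set into dates above/below dp, taking min of the upper part and max of the lower part.
import Mathlib
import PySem

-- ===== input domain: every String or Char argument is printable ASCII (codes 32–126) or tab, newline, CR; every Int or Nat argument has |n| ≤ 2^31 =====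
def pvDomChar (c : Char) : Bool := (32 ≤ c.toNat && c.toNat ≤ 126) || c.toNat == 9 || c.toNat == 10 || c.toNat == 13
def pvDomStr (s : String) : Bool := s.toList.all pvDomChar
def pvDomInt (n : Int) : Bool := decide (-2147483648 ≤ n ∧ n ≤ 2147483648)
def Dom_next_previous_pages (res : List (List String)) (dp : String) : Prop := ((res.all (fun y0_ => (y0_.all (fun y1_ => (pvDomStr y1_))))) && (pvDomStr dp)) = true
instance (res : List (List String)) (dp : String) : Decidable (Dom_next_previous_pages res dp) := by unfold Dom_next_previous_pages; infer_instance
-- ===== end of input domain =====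

-- B replaces sort + enumerate neighbour scan by a membership test plus a min/max partition of the date set (alternative decomposition, same result).


-- ===== PORT A =====
-- the 'for ind, r in enumerate(sorted_result)' loop of A (early return on the first r == dp)
def npLoopA (sr : List String) (dp : String) : List (Int × String) → Option (Option String × Option String)
  | [] => none
  | (ind, r) :: rest =>
    if r == dp then
      let next_date : Option String :=
        if PySem.List.pyGetD sr ind "" ≠ PySem.List.pyGetD sr (-1) "" then
          some (PySem.List.pyGetD sr (ind + 1) "")
        else none
      let previous_date : Option String :=
        if PySem.List.pyGetD sr ind "" ≠ PySem.List.pyGetD sr 0 "" then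
          some (PySem.List.pyGetD sr (ind - 1) "")
        else none
      some (next_date, previous_date)
    else npLoopA sr dp rest

def next_previous_pages (res : List (List String)) (dp : String) : Option (Option String × Option String) :=
  let date_list := res.map (fun r => PySem.List.pyGetD r 3 "")   -- r[3]; in range under Pre_
  let sorted_result := PySem.List.sorted (PySem.Set.ofList date_list) (fun x => x) false
  npLoopA sorted_result dp (PySem.List.enumerate sorted_result 0)

-- ===== PORT B =====
def next_previous_pages_alt (res : List (List String)) (dp : String) : Option (Option String × Option String) :=
  let dates : PySem.Set String := PySem.Set.ofList (res.map (fun r => PySem.List.pyGetD r 3 ""))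
  if dp ∈ dates then
    let greater := dates.filter (fun d => decide (dp < d))
    let lesser := dates.filter (fun d => decide (d < dp))
    some (PySem.List.min? greater (fun x => x), PySem.List.max? lesser (fun x => x))
  else none

-- ===== PRECONDITION & SPEC =====
-- Pre_ excludes rows with fewer than four fields, on which the Python A raises IndexError at r[3].
def Pre_next_previous_pages (res : List (List String)) (dp : String) : Prop :=
  ∀ r ∈ res, 3 < r.length
instance (res : List (List String)) (dp : String) : Decidable (Pre_next_previous_pages res dp) := by
  unfold Pre_next_previous_pages; infer_instance
def pvWitness_next_previous_pages : List (List String) × String :=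
  ([["1", "t", "a", "2020-01-01"], ["2", "u", "a", "2020-02-01"]], "2020-01-01")

def Spec_next_previous_pages (res : List (List String)) (dp : String) (out : Option (Option String × Option String)) : Prop := out = next_previous_pages_alt res dp
instance (res : List (List String)) (dp : String) (out : Option (Option String × Option String)) : Decidable (Spec_next_previous_pages res dp out) := by unfold Spec_next_previous_pages; infer_instance

-- ===== CLAIM (what is proved, stated in full; the proofs are below) =====
def Claim_equal_next_previous_pages : Prop := ∀ (res : List (List String)) (dp : String), Dom_next_previous_pages res dp → Pre_next_previous_pages res dp → Spec_next_previous_pages res dp (next_previous_pages res dp)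

-- ===== LEMMAS AND PROOFS =====

-- skipping enumerate entries whose string is not dp
lemma npLoopA_append (sr : List String) (dp : String) (p1 p2 : List (Int × String))
    (h : ∀ p ∈ p1, p.2 ≠ dp) : npLoopA sr dp (p1 ++ p2) = npLoopA sr dp p2 := by
  induction p1 with
  | nil => rfl
  | cons q t ih =>
      obtain ⟨i, r⟩ := q
      have hr : r ≠ dp := h (i, r) (List.mem_cons_self)
      simp only [List.cons_append, npLoopA, beq_iff_eq, if_neg hr]
      exact ih (fun p hp => h p (List.mem_cons_of_mem _ hp))

lemma npLoopA_none (sr : List String) (dp : String) (p1 : List (Int × String))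
    (h : ∀ p ∈ p1, p.2 ≠ dp) : npLoopA sr dp p1 = none := by
  have := npLoopA_append sr dp p1 [] h
  simpa using this

lemma foldl_min_of_le (t : List String) (a : String) (h : ∀ y ∈ t, a ≤ y) :
    t.foldl min a = a := by
  induction t with
  | nil => rfl
  | cons c t ih =>
      have hac : a ≤ c := h c (List.mem_cons_self)
      simp only [List.foldl_cons, min_eq_left hac]
      exact ih (fun y hy => h y (List.mem_cons_of_mem _ hy))

lemma foldl_max_getLast (t : List String) (a : String)
    (h : (a :: t).Pairwise (· ≤ ·)) :
    t.foldl max a = (a :: t).getLast (List.cons_ne_nil a t) := by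
  induction t generalizing a with
  | nil => rfl
  | cons c t ih =>
      obtain ⟨ha, ht⟩ := List.pairwise_cons.mp h
      have hac : a ≤ c := ha c (List.mem_cons_self)
      simp only [List.foldl_cons, max_eq_right hac]
      rw [ih c ht]
      simp [List.getLast]

lemma min?_perm_id (la lb : List String) (h : la.Perm lb) :
    PySem.List.min? la (fun x => x) = PySem.List.min? lb (fun x => x) := by
  cases hla : PySem.List.min? la (fun x => x) with
  | none =>
      have : la = [] := (PySem.List.min?_eq_none_iff _ _).1 hla
      subst this
      simp [h.symm.eq_nil, PySem.List.min?]
  | some m =>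
      cases hlb : PySem.List.min? lb (fun x => x) with
      | none =>
          have : lb = [] := (PySem.List.min?_eq_none_iff _ _).1 hlb
          subst this
          simp [h.eq_nil, PySem.List.min?] at hla
      | some m' =>
          have hm : m ∈ la := PySem.List.min?_mem hla
          have hm' : m' ∈ lb := PySem.List.min?_mem hlb
          have h1 : m ≤ m' := PySem.List.min?_isMin hla m' (h.mem_iff.mpr hm')
          have h2 : m' ≤ m := PySem.List.min?_isMin hlb m (h.mem_iff.mp hm)
          exact congrArg some (le_antisymm h1 h2)

lemma max?_perm_id (la lb : List String) (h : la.Perm lb) :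
    PySem.List.max? la (fun x => x) = PySem.List.max? lb (fun x => x) := by
  cases hla : PySem.List.max? la (fun x => x) with
  | none =>
      have : la = [] := (PySem.List.max?_eq_none_iff _ _).1 hla
      subst this
      simp [h.symm.eq_nil, PySem.List.max?]
  | some m =>
      cases hlb : PySem.List.max? lb (fun x => x) with
      | none =>
          have : lb = [] := (PySem.List.max?_eq_none_iff _ _).1 hlb
          subst this
          simp [h.eq_nil, PySem.List.max?] at hla
      | some m' =>
          have hm : m ∈ la := PySem.List.max?_mem hla
          have hm' : m' ∈ lb := PySem.List.max?_mem hlb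
          have h1 : m' ≤ m := PySem.List.max?_isMax hla m' (h.mem_iff.mpr hm')
          have h2 : m ≤ m' := PySem.List.max?_isMax hlb m (h.mem_iff.mp hm)
          exact congrArg some (le_antisymm h2 h1)

-- the central equality, stated on the deduplicated date list
lemma np_central (dl : List String) (dp : String) :
    npLoopA (PySem.List.sorted (PySem.Set.ofList dl) (fun x => x) false) dp
      (PySem.List.enumerate (PySem.List.sorted (PySem.Set.ofList dl) (fun x => x) false) 0)
    = (if dp ∈ PySem.Set.ofList dl then
        some (PySem.List.min? ((PySem.Set.ofList dl).filter (fun d => decide (dp < d))) (fun x => x),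
              PySem.List.max? ((PySem.Set.ofList dl).filter (fun d => decide (d < dp))) (fun x => x))
      else none) := by
  set sr := PySem.List.sorted (PySem.Set.ofList dl) (fun x => x) false with hsrdef
  have hperm : sr.Perm (PySem.Set.ofList dl) := PySem.List.sorted_perm _ _ _
  have hpw : sr.Pairwise (· < ·) := PySem.List.sorted_ofList_pairwise_lt dl
  by_cases hmem : dp ∈ PySem.Set.ofList dl
  · rw [if_pos hmem]
    have hdp_sr : dp ∈ sr := hperm.mem_iff.mpr hmem
    obtain ⟨l1, l2, hsr⟩ := List.append_of_mem hdp_sr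
    rw [hsr] at hpw
    obtain ⟨hpw1, hpw2, hx⟩ := List.pairwise_append.mp hpw
    obtain ⟨hdp2, hpw2'⟩ := List.pairwise_cons.mp hpw2
    have hl1dp : ∀ x ∈ l1, x < dp := fun x hx1 => hx x hx1 dp List.mem_cons_self
    -- the loop skips l1 and fires at dp
    have henum : PySem.List.enumerate sr 0 =
        PySem.List.enumerate l1 0 ++ ((0 + (l1.length : Int), dp) :: PySem.List.enumerate l2 (0 + (l1.length : Int) + 1)) := by
      rw [hsr, PySem.List.enumerate_append, PySem.List.enumerate_cons]
    rw [henum, npLoopA_append sr dp _ _ (by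
      intro p hp
      obtain ⟨k, hk, rfl⟩ := (PySem.List.mem_enumerate_iff _ _ _).mp hp
      exact ne_of_lt (hl1dp _ (List.getElem_mem hk)))]
    show npLoopA sr dp ((0 + (l1.length : Int), dp) :: _) = _
    simp only [npLoopA, beq_self_eq_true, if_true, zero_add]
    -- index values
    have hind : PySem.List.pyGetD sr (l1.length : Int) "" = dp := by
      rw [hsr, PySem.List.pyGetD_natCast]
      simp [List.getD_eq_getElem?_getD]
    have hzero : PySem.List.pyGetD sr 0 "" = (l1 ++ dp :: l2).getD 0 "" := by
      rw [hsr]; exact PySem.List.pyGetD_zero _ _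
    -- filters
    have hfiltgt : sr.filter (fun d => decide (dp < d)) = l2 := by
      rw [hsr, List.filter_append, List.filter_cons]
      rw [List.filter_eq_nil_iff.mpr (fun x hx1 => by simp [not_lt.mpr (le_of_lt (hl1dp x hx1))])]
      rw [List.filter_eq_self.mpr (fun y hy => by simp [hdp2 y hy])]
      simp
    have hfiltlt : sr.filter (fun d => decide (d < dp)) = l1 := by
      rw [hsr, List.filter_append, List.filter_cons]
      rw [List.filter_eq_self.mpr (fun x hx1 => by simp [hl1dp x hx1])]
      rw [List.filter_eq_nil_iff.mpr (fun y hy => by simp [not_lt.mpr (le_of_lt (hdp2 y hy))])]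
      simp
    have hming : PySem.List.min? ((PySem.Set.ofList dl).filter (fun d => decide (dp < d))) (fun x => x)
        = PySem.List.min? l2 (fun x => x) := by
      rw [min?_perm_id _ _ ((hperm.symm.filter _))]
      rw [hfiltgt]
    have hmaxl : PySem.List.max? ((PySem.Set.ofList dl).filter (fun d => decide (d < dp))) (fun x => x)
        = PySem.List.max? l1 (fun x => x) := by
      rw [max?_perm_id _ _ ((hperm.symm.filter _))]
      rw [hfiltlt]
    rw [hming, hmaxl, hind]
    rw [Option.some.injEq, Prod.mk.injEq]
    constructor
    -- next component
    · cases l2 with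
      | nil =>
          have hlast0 : PySem.List.pyGetD sr (-1) "" = dp := by
            rw [hsr, PySem.List.pyGetD_neg_one _ "" (by simp)]; simp
          rw [hlast0]
          simp [PySem.List.min?]
      | cons a t =>
          have hgl : PySem.List.pyGetD sr (-1) "" = (a :: t).getLast (by simp) := by
            rw [hsr, PySem.List.pyGetD_neg_one _ "" (by simp)]
            rw [List.getLast_append_of_ne_nil (l := l1) (l' := dp :: a :: t)]
            all_goals simp [List.getLast]
          have hdplt : dp < (a :: t).getLast (by simp) := hdp2 _ (List.getLast_mem _)
          rw [hgl, if_pos (ne_of_lt hdplt)]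
          have hnext : PySem.List.pyGetD sr ((l1.length : Int) + 1) "" = a := by
            rw [hsr]
            have h1 : ((l1.length : Int) + 1) = ((l1.length + 1 : Nat) : Int) := by push_cast; ring
            rw [h1, PySem.List.pyGetD_natCast]
            rw [List.getD_eq_getElem?_getD, List.getElem?_append_right (by omega)]
            simp
          rw [hnext]
          rw [PySem.List.min?_id_cons]
          rw [foldl_min_of_le t a (fun y hy => le_of_lt ((List.pairwise_cons.mp hpw2').1 y hy))]
    -- previous component
    · cases l1 with
      | nil =>
          rw [hzero]
          simp [PySem.List.max?]
      | cons b t1 =>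
          have hb : b < dp := hl1dp b List.mem_cons_self
          rw [hzero]
          simp only [List.cons_append, List.getD_cons_zero]
          rw [if_pos (ne_of_lt hb).symm]
          have hprev : PySem.List.pyGetD sr (((b :: t1).length : Int) - 1) "" = (b :: t1).getLast (by simp) := by
            rw [hsr]
            have h1 : (((b :: t1).length : Int) - 1) = ((t1.length : Nat) : Int) := by simp
            rw [h1, PySem.List.pyGetD_natCast]
            rw [List.getD_eq_getElem?_getD, List.getElem?_append_left (by simp), List.getLast_eq_getElem]
            simp only [List.length_cons, Nat.add_sub_cancel]
            rw [List.getElem?_eq_getElem (by simp : t1.length < (b::t1).length)]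
            rfl
          rw [hprev]
          rw [PySem.List.max?_id_cons]
          rw [foldl_max_getLast t1 b (hpw1.imp le_of_lt)]
  · rw [if_neg hmem]
    apply npLoopA_none
    intro p hp
    obtain ⟨k, hk, rfl⟩ := (PySem.List.mem_enumerate_iff _ _ _).mp hp
    intro hcontra
    exact hmem (hperm.mem_iff.mp (hcontra ▸ List.getElem_mem hk))

-- ===== VERDICT (by name: the statement is the Claim_ definition above) =====
theorem next_previous_pages_spec : Claim_equal_next_previous_pages := by
  intro res dp _ _
  unfold Spec_next_previous_pages next_previous_pages next_previous_pages_alt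
  exact np_central (res.map (fun r => PySem.List.pyGetD r 3 "")) dp
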